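-- pv_equiv track=rewrite | github.com/Kristyli2009/DegreeSequences | HHalgorithm.py | min_hh
-- ===== SOURCE A (Python) =====
-- def min_hh(array):
--     while array[-1] == 0:
--         array = array[:-1]
--     arr1 = sorted(array)
--     min_n = min(arr1)
--     i = 0
--     while min_n == 0:
--         min_n = arr1[i]
--         i += 1
--     pivot = len(array) - array[::-1].index(min_n) - 1
--     return min_n, pivot
-- ===== SOURCE B (Python) =====
-- def min_hh(array):
--     # same return value as A on lists containing a nonzero element:
--     # the minimum over the nonzero entries, and the last index holding it.
--     min_n = min(v for v in array if v != 0)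
--     pivot = max(i for i, v in enumerate(array) if v == min_n)
--     return min_n, pivot
-- ===== Notes on version B (the rewrite author's own statement) =====
-- stated objective: faster
-- what changed: Replaced the trailing-zero stripping loop, sort, zero-skipping index walk and reversed-list .index by two direct linear passes: min over the nonzero entries and max over the indices holding it.
import Mathlib
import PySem

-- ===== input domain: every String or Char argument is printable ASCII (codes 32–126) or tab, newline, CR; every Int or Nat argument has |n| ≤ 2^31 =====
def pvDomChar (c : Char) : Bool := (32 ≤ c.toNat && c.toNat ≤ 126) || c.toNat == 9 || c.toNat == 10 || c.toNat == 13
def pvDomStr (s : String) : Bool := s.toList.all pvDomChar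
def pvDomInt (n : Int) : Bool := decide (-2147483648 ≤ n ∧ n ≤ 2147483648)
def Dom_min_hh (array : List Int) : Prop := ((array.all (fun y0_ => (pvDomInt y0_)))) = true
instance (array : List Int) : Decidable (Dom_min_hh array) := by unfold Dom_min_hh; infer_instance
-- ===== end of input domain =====

-- B replaces A's strip/sort/index-walk/reverse-index by two linear passes (min of nonzeros, max index holding it); equal on lists with a nonzero element.

-- ===== PORT A =====
-- `while array[-1] == 0: array = array[:-1]`  (on empty / all-zero input Python raises IndexError; excluded by Pre_)
def stripTrailingZeros (arr : List Int) : List Int :=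
  if PySem.List.pyGet? arr (-1) = some 0 then
    stripTrailingZeros (PySem.List.slice arr none (some (-1)))
  else arr
termination_by arr.length
decreasing_by
  simp only [PySem.List.slice_to_neg_one]
  rcases arr with _ | _
  · simp [PySem.List.pyGet?] at *
  · simp [List.length_dropLast]

-- `i = 0; while min_n == 0: min_n = arr1[i]; i += 1`  (walks arr1 from the front; [] = IndexError, keeps m)
def pickNonzero : List Int → Int → Int
  | l, m =>
    if m = 0 then
      match l with
      | [] => m
      | x :: xs => pickNonzero xs x
    else m

def min_hh (array : List Int) : Int × Int :=
  let arr := stripTrailingZeros array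
  let arr1 := PySem.List.sorted arr (fun x => x) false
  let min0 := (PySem.List.min? arr1 (fun x => x)).getD 0      -- min(arr1); none (ValueError) only outside Pre_
  let min_n := pickNonzero arr1 min0
  let pivot : Int := (arr.length : Int) -
    ((PySem.List.index? ((PySem.List.slice? arr none none (-1)).getD []) min_n).getD 0 : Int) - 1
  (min_n, pivot)

-- ===== PORT B =====
def min_hh_alt (array : List Int) : Int × Int :=
  let min_n := (PySem.List.min? (array.filter (fun v => v ≠ 0)) (fun x => x)).getD 0   -- min(v for v in array if v != 0)
  let pivot := (PySem.List.max?
      (((PySem.List.enumerate array).filter (fun p => p.2 == min_n)).map Prod.fst)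
      (fun x => x)).getD 0                                     -- max(i for i,v in enumerate(array) if v == min_n)
  (min_n, pivot)

-- ===== PRECONDITION & SPEC =====
-- Pre_ excludes exactly the inputs with no nonzero element, where A raises IndexError (and B raises ValueError).
def Pre_min_hh (array : List Int) : Prop := ∃ v ∈ array, v ≠ 0
instance (array : List Int) : Decidable (Pre_min_hh array) := by unfold Pre_min_hh; infer_instance
def pvWitness_min_hh : List Int := [3, 1, 0, 1, 0]

def Spec_min_hh (array : List Int) (out : Int × Int) : Prop := out = min_hh_alt array
instance (array : List Int) (out : Int × Int) : Decidable (Spec_min_hh array out) := by unfold Spec_min_hh; infer_instance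

-- ===== CLAIM (what is proved, stated in full; the proofs are below) =====
def Claim_equal_min_hh : Prop := ∀ (array : List Int), Dom_min_hh array → Pre_min_hh array → Spec_min_hh array (min_hh array)

-- ===== LEMMAS AND PROOFS =====
lemma strip_decomp (arr : List Int) : ∃ t, arr = stripTrailingZeros arr ++ t ∧ (∀ x ∈ t, x = 0) ∧ (stripTrailingZeros arr).getLast? ≠ some 0 := by
  induction arr using stripTrailingZeros.induct with
  | case1 arr h ih =>
    rw [stripTrailingZeros, if_pos h]
    rw [PySem.List.pyGet?_neg_one] at h
    obtain ⟨t, ht1, ht2, ht3⟩ := ih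
    rcases arr with _ | ⟨a, as⟩
    · simp at h
    · refine ⟨t ++ [0], ?_, ?_, ht3⟩
      · have hd : (a :: as) = (a :: as).dropLast ++ [(a :: as).getLast (by simp)] :=
          (List.dropLast_append_getLast _).symm
        have hl : (a :: as).getLast (by simp) = 0 := by
          have h2 := List.getLast?_eq_some_getLast (l := a :: as) (by simp)
          rw [h2] at h; exact (Option.some_inj.mp h)
        simp only [PySem.List.slice_to_neg_one] at ht1 ⊢
        conv_lhs => rw [hd, hl, ht1]
        rw [List.append_assoc]
      · intro x hx
        rcases List.mem_append.mp hx with h1 | h1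
        · exact ht2 x h1
        · simpa using h1
  | case2 arr h =>
    rw [stripTrailingZeros, if_neg h]
    rw [PySem.List.pyGet?_neg_one] at h
    exact ⟨[], by simp, by simp, h⟩

lemma pick_ne (l : List Int) (m : Int) (h : ¬ m = 0) : pickNonzero l m = m := by
  rw [pickNonzero.eq_def]; simp [h]

lemma pick_zero (l : List Int) : pickNonzero l 0 = (l.filter (fun v => v ≠ 0)).headD 0 := by
  induction l with
  | nil => rw [pickNonzero.eq_def]; simp
  | cons x xs ih =>
    rw [pickNonzero.eq_def]; simp only [if_pos]
    by_cases hx : x = 0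
    · subst hx; simpa using ih
    · rw [pick_ne _ _ hx]; simp [hx]

theorem main_eq (array : List Int) (hpre : ∃ v ∈ array, v ≠ 0) : min_hh array = min_hh_alt array := by
  obtain ⟨t, harr, ht0, hlast⟩ := strip_decomp array
  set s := stripTrailingZeros array with hs
  -- the nonzero filter is unchanged by stripping
  have hFs : array.filter (fun v => v ≠ 0) = s.filter (fun v => v ≠ 0) := by
    have htn : t.filter (fun v => v ≠ 0) = [] :=
      List.filter_eq_nil_iff.mpr (by intro x hx; simpa using ht0 x hx)
    rw [harr, List.filter_append, htn, List.append_nil]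
  set F := array.filter (fun v => v ≠ 0) with hF
  have hFne : F ≠ [] := by
    obtain ⟨v, hv, hvne⟩ := hpre
    have : v ∈ F := List.mem_filter.mpr ⟨hv, by simpa using hvne⟩
    exact List.ne_nil_of_mem this
  -- B's min
  obtain ⟨mB, hmB⟩ : ∃ m, PySem.List.min? F (fun x => x) = some m := by
    cases h : PySem.List.min? F (fun x => x) with
    | none => exact absurd ((PySem.List.min?_eq_none_iff _ _).mp h) hFne
    | some m => exact ⟨m, rfl⟩
  have hmBmem : mB ∈ F := PySem.List.min?_mem hmB
  have hmBmin : ∀ y ∈ F, mB ≤ y := PySem.List.min?_isMin hmB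
  have hmBne : mB ≠ 0 := by simpa using (List.mem_filter.mp hmBmem).2
  have hmBs : mB ∈ s := by rw [hFs] at hmBmem; exact (List.mem_filter.mp hmBmem).1
  -- A's sorted list and its min
  set arr1 := PySem.List.sorted s (fun x => x) false with harr1
  have hsne : s ≠ [] := by
    intro h; rw [h] at hFs; simp at hFs; exact hFne (hF ▸ hFs)
  have harr1ne : arr1 ≠ [] := by
    rw [harr1]; rw [Ne, PySem.List.sorted_eq_nil_iff _ _ _]; exact hsne
  obtain ⟨m0, hm0⟩ : ∃ m, PySem.List.min? arr1 (fun x => x) = some m := by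
    cases h : PySem.List.min? arr1 (fun x => x) with
    | none => exact absurd ((PySem.List.min?_eq_none_iff _ _).mp h) harr1ne
    | some m => exact ⟨m, rfl⟩
  have hm0mem : m0 ∈ s := ((PySem.List.mem_sorted _ _ _ _).mp (PySem.List.min?_mem hm0))
  have hm0min : ∀ y ∈ s, m0 ≤ y := by
    intro y hy
    exact PySem.List.min?_isMin hm0 y ((PySem.List.mem_sorted _ _ _ _).mpr hy)
  -- the picked value equals mB
  have hpick : pickNonzero arr1 m0 = mB := by
    by_cases h0 : m0 = 0
    · rw [h0, pick_zero]
      have hperm : (arr1.filter (fun v => v ≠ 0)).Perm F := by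
        rw [hFs]; exact (PySem.List.sorted_perm s (fun x => x) false).filter _
      obtain ⟨h, tl, hFa⟩ : ∃ h tl, arr1.filter (fun v => v ≠ 0) = h :: tl := by
        cases hfa : arr1.filter (fun v => v ≠ 0) with
        | nil => rw [hfa] at hperm; exact absurd hperm.symm.eq_nil hFne
        | cons h tl => exact ⟨h, tl, rfl⟩
      rw [hFa]; simp only [List.headD_cons]
      have hhmem : h ∈ F := hperm.mem_iff.mp (by rw [hFa]; exact List.mem_cons_self)
      have hpair : (arr1.filter (fun v => v ≠ 0)).Pairwise (fun a b => a ≤ b) :=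
        (PySem.List.sorted_pairwise s (fun x => x)).filter _
      have hhmin : ∀ y ∈ F, h ≤ y := by
        intro y hy
        have : y ∈ h :: tl := hFa ▸ hperm.mem_iff.mpr hy
        rcases List.mem_cons.mp this with rfl | hmem
        · exact le_refl _
        · rw [hFa] at hpair
          exact (List.pairwise_cons.mp hpair).1 y hmem
      exact le_antisymm (hhmin mB hmBmem) (hmBmin h hhmem)
    · rw [pick_ne _ _ h0]
      have hm0F : m0 ∈ F := by
        rw [hFs]; exact List.mem_filter.mpr ⟨hm0mem, by simpa using h0⟩
      exact le_antisymm (hm0min mB hmBs) (hmBmin m0 hm0F)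
  -- pivot: decompose s around the last occurrence of mB
  obtain ⟨r, hr⟩ : ∃ r, PySem.List.index? s.reverse mB = some r := by
    cases h : PySem.List.index? s.reverse mB with
    | none => exact absurd ((PySem.List.index?_eq_none_iff _ _).mp h) (by simpa using hmBs)
    | some r => exact ⟨r, rfl⟩
  obtain ⟨pre, suf, hrev, hlen, hnotpre⟩ := (PySem.List.index?_eq_some_iff _ _ _).mp hr
  have hsdec : s = suf.reverse ++ mB :: pre.reverse := by
    have := congrArg List.reverse hrev
    simpa [List.reverse_append] using this
  have harr2 : array = (suf.reverse ++ [mB]) ++ (pre.reverse ++ t) := by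
    rw [harr, hsdec]; simp
  have harr2a : array = suf.reverse ++ (mB :: (pre.reverse ++ t)) := by
    rw [harr, hsdec]; simp
  set j0 := suf.length with hj0
  have hj0get : array[j0]? = some mB := by
    rw [harr2a, List.getElem?_append_right (by simp [hj0])]
    simp [hj0]
  have hj0lt : j0 < array.length := by
    have := List.getElem?_eq_some_iff.mp hj0get
    exact this.1
  have hub : ∀ k : Nat, k < array.length → array[k]? = some mB → k ≤ j0 := by
    intro k hk hkget
    by_contra hgt
    have hge : (suf.reverse ++ [mB]).length ≤ k := by simp [hj0] at hgt ⊢; omega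
    rw [harr2, List.getElem?_append_right hge] at hkget
    have hmem : mB ∈ pre.reverse ++ t := List.mem_of_getElem? hkget
    rcases List.mem_append.mp hmem with h1 | h1
    · exact hnotpre (List.mem_reverse.mp h1)
    · exact hmBne (ht0 mB h1)
  -- B's index list
  set L := ((PySem.List.enumerate array).filter (fun p => p.2 == mB)).map Prod.fst with hL
  have hLmem : ∀ y : Int, y ∈ L ↔ ∃ (k : Nat), k < array.length ∧ array[k]? = some mB ∧ y = (k : Int) := by
    intro y
    constructor
    · intro hy
      obtain ⟨p, hp, hpy⟩ := List.mem_map.mp hy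
      obtain ⟨hpe, hpv⟩ := List.mem_filter.mp hp
      obtain ⟨k, hk, hpk⟩ := (PySem.List.mem_enumerate_iff _ _ _).mp hpe
      refine ⟨k, hk, ?_, ?_⟩
      · rw [List.getElem?_eq_getElem hk]
        have : p.2 = mB := by simpa using hpv
        rw [hpk] at this; simpa using this.symm ▸ rfl
      · rw [← hpy, hpk]; simp
    · rintro ⟨k, hk, hkget, rfl⟩
      refine List.mem_map.mpr ⟨((k : Int), array[k]), ?_, rfl⟩
      refine List.mem_filter.mpr ⟨?_, ?_⟩
      · exact (PySem.List.mem_enumerate_iff _ _ _).mpr ⟨k, hk, by simp⟩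
      · have : array[k] = mB := by
          have := List.getElem?_eq_getElem hk
          rw [this] at hkget; exact Option.some_inj.mp hkget
        simpa using this
  have hj0L : (j0 : Int) ∈ L := (hLmem _).mpr ⟨j0, hj0lt, hj0get, rfl⟩
  have hLub : ∀ y ∈ L, y ≤ (j0 : Int) := by
    intro y hy
    obtain ⟨k, hk, hkget, rfl⟩ := (hLmem y).mp hy
    exact_mod_cast hub k hk hkget
  obtain ⟨p, hp⟩ : ∃ p, PySem.List.max? L (fun x => x) = some p := by
    cases h : PySem.List.max? L (fun x => x) with
    | none => exact absurd ((PySem.List.max?_eq_none_iff _ _).mp h) (List.ne_nil_of_mem hj0L)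
    | some p => exact ⟨p, rfl⟩
  have hpj0 : p = (j0 : Int) := by
    exact le_antisymm (hLub p (PySem.List.max?_mem hp)) (PySem.List.max?_isMax hp _ hj0L)
  -- lengths
  have hslen : s.length = suf.length + 1 + pre.length := by
    rw [hsdec]; simp; omega
  have hrval : r = pre.length := hlen.symm
  -- assemble
  have hmin0 : (PySem.List.min? arr1 (fun x => x)).getD 0 = m0 := by rw [hm0]; rfl
  simp only [min_hh, min_hh_alt]
  rw [← hs, ← harr1, ← hF, hmin0, hpick, hmB]
  simp only [Option.getD_some, PySem.List.slice?_none_none_neg_one]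
  rw [← hL, hp, hr]
  simp only [Option.getD_some, hpj0]
  refine Prod.ext rfl ?_
  simp only [hslen, hrval, hj0]
  push_cast
  ring

-- ===== VERDICT (by name: the statement is the Claim_ definition above) =====
theorem min_hh_spec : Claim_equal_min_hh := by
  intro array _ hpre
  show min_hh array = min_hh_alt array
  exact main_eq array hpre
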